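-- pv_equiv track=rewrite | github.com/eddmpython/dartlab | src/dartlab/scan/audit/__init__.py | _sortedYears
-- ===== SOURCE A (Python) =====
-- def _sortedYears(years: list) -> list[str]:
--     """모든 연도를 정렬: 숫자 연도 우선 (내림차순), 그 다음 한국 회계연도 (문자열 내림차순)."""
--     numeric = []
--     other = []
--     for y in years:
--         s = str(y).strip()
--         if s.isdigit():
--             numeric.append(s)
--         elif s and s != "-":
--             other.append(s)
--     return sorted(numeric, key=lambda y: int(y), reverse=True) + sorted(other, reverse=True)
-- ===== SOURCE B (Python) =====
-- def _sortedYears(years: list) -> list[str]: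
--     kept = [s for s in (str(y).strip() for y in years)
--             if s.isdigit() or (s and s != "-")]
--     return sorted(kept,
--                   key=lambda s: (1, (int(s), "")) if s.isdigit() else (0, (0, s)),
--                   reverse=True)
-- ===== Notes on version B (the rewrite author's own statement) =====
-- stated objective: simpler
-- what changed: A partitions into two lists and performs two separate sorts (int-keyed and plain) concatenated; B does one filtering pass and a single stable sort with a composite key (group rank, int value, string), so the partition and the concatenation disappear.
import Mathlib
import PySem

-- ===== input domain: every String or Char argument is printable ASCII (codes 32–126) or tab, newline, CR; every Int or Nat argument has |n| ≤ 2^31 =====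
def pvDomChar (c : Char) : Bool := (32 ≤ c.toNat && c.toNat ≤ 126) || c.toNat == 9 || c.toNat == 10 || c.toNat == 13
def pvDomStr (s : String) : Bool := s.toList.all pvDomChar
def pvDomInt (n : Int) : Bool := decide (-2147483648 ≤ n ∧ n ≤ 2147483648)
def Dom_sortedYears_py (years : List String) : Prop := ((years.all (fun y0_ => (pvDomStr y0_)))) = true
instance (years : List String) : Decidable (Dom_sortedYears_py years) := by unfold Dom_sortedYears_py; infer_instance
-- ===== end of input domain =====

-- B replaces A's partition-into-two-lists-then-two-sorts-and-concatenate with one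
-- filtering pass and a SINGLE stable keyed sort (composite key: group rank, int value,
-- string); objective: simpler (one sort call instead of two sorts plus a concat).

-- ===== PORT A =====
def sortedYears_py (years : List String) : List String :=
  let pr := years.foldl (fun (acc : List String × List String) y =>
      let s := PySem.Str.strip y          -- str(y) on a str is y itself
      if PySem.Str.strIsdigit s then (acc.1 ++ [s], acc.2)
      else if s != "" && s != "-" then (acc.1, acc.2 ++ [s])
      else acc) ([], [])
  -- key=int(y): ofStr? always parses here since the list holds digit-only strings
  PySem.List.sorted pr.1 (fun y => (PySem.Int.ofStr? y).getD 0) true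
    ++ PySem.List.sorted pr.2 (fun y => y) true

-- ===== PORT B =====
-- B's composite sort key (1, (int(s), "")) / (0, (0, s)): group rank, then (int, str) lex
def pvKey1 (s : String) : Int :=
  if PySem.Str.strIsdigit s then 1 else 0
def pvKey2 (s : String) : Lex (Int × String) :=
  if PySem.Str.strIsdigit s then toLex ((PySem.Int.ofStr? s).getD 0, "")
  else toLex (0, s)

def sortedYears_py_alt (years : List String) : List String :=
  PySem.List.sorted2
    ((years.map (fun y => PySem.Str.strip y)).filter
      (fun s => PySem.Str.strIsdigit s || (s != "" && s != "-")))
    pvKey1 pvKey2 true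

-- ===== PRECONDITION & SPEC =====
def Spec_sortedYears_py (years : List String) (out : List String) : Prop := out = sortedYears_py_alt years
instance (years : List String) (out : List String) : Decidable (Spec_sortedYears_py years out) := by unfold Spec_sortedYears_py; infer_instance

-- ===== CLAIM (what is proved, stated in full; the proofs are below) =====
def Claim_equal_sortedYears_py : Prop := ∀ (years : List String), Dom_sortedYears_py years → Spec_sortedYears_py years (sortedYears_py years)

-- ===== LEMMAS AND PROOFS =====

-- If x sorts before everything in B, inserting into A ++ B is inserting into A.
theorem pv_insertBy_all_true {α : Type} (f : α → α → Bool) (x : α) (A B : List α)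
    (h : ∀ y ∈ B, f x y = true) :
    PySem.List.insertBy f x (A ++ B) = PySem.List.insertBy f x A ++ B := by
  induction A with
  | nil =>
    cases B with
    | nil => simp [PySem.List.insertBy]
    | cons b bs => simp [PySem.List.insertBy, h b (by simp)]
  | cons a as ih =>
    by_cases hfa : f x a = true
    · simp [PySem.List.insertBy, hfa]
    · simp only [Bool.not_eq_true] at hfa
      simp [PySem.List.insertBy, hfa, ih]

-- If x sorts after everything in A, inserting into A ++ B is inserting into B.
theorem pv_insertBy_all_false {α : Type} (f : α → α → Bool) (x : α) (A B : List α)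
    (h : ∀ y ∈ A, f x y = false) :
    PySem.List.insertBy f x (A ++ B) = A ++ PySem.List.insertBy f x B := by
  induction A with
  | nil => simp
  | cons a as ih =>
    simp [PySem.List.insertBy, h a (by simp)]
    exact ih (fun y hy => h y (by simp [hy]))

-- The insertion-sort fold splits along a predicate that dominates the comparison.
theorem pv_foldl_ins_split {α : Type} (P : α → Bool) (f : α → α → Bool)
    (hPf : ∀ a b, P a = true → P b = false → f a b = true ∧ f b a = false) :
    ∀ (xs A B : List α), (∀ a ∈ A, P a = true) → (∀ b ∈ B, P b = false) →
      xs.foldl (fun acc x => PySem.List.insertBy f x acc) (A ++ B)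
        = (xs.filter P).foldl (fun acc x => PySem.List.insertBy f x acc) A
          ++ (xs.filter (fun x => !P x)).foldl (fun acc x => PySem.List.insertBy f x acc) B := by
  intro xs
  induction xs with
  | nil => intro A B _ _; simp
  | cons x xs ih =>
    intro A B hA hB
    by_cases hx : P x = true
    · have hstep : PySem.List.insertBy f x (A ++ B) = PySem.List.insertBy f x A ++ B :=
        pv_insertBy_all_true f x A B (fun y hy => (hPf x y hx (hB y hy)).1)
      have hA' : ∀ a ∈ PySem.List.insertBy f x A, P a = true := by
        intro a ha
        rcases (PySem.List.mem_insertBy f x a A).1 ha with rfl | ha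
        · exact hx
        · exact hA a ha
      simp only [List.foldl_cons, List.filter_cons, hx, hstep]
      simpa using ih (PySem.List.insertBy f x A) B hA' hB
    · simp only [Bool.not_eq_true] at hx
      have hstep : PySem.List.insertBy f x (A ++ B) = A ++ PySem.List.insertBy f x B :=
        pv_insertBy_all_false f x A B (fun y hy => (hPf y x (hA y hy) hx).2)
      have hB' : ∀ b ∈ PySem.List.insertBy f x B, P b = false := by
        intro b hb
        rcases (PySem.List.mem_insertBy f x b B).1 hb with rfl | hb
        · exact hx
        · exact hB b hb
      simp only [List.foldl_cons, List.filter_cons, hx, hstep]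
      simpa using ih A (PySem.List.insertBy f x B) hA hB'

theorem pv_insertBy_congr {α : Type} (f g : α → α → Bool) (x : α) (l : List α)
    (h : ∀ y ∈ l, f x y = g x y) :
    PySem.List.insertBy f x l = PySem.List.insertBy g x l := by
  induction l with
  | nil => rfl
  | cons a as ih =>
    have ha := h a (by simp)
    by_cases hfa : f x a = true
    · simp [PySem.List.insertBy, hfa, ha ▸ hfa]
    · simp only [Bool.not_eq_true] at hfa
      simp [PySem.List.insertBy, hfa, ha ▸ hfa]
      exact ih (fun y hy => h y (by simp [hy]))

-- The insertion-sort fold only looks at comparisons between elements of xs ++ acc.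
theorem pv_foldl_ins_congr {α : Type} (f g : α → α → Bool) (S : List α) :
    ∀ (xs acc : List α), (∀ x ∈ xs, x ∈ S) → (∀ x ∈ acc, x ∈ S) →
      (∀ a ∈ S, ∀ b ∈ S, f a b = g a b) →
      xs.foldl (fun acc x => PySem.List.insertBy f x acc) acc
        = xs.foldl (fun acc x => PySem.List.insertBy g x acc) acc := by
  intro xs
  induction xs with
  | nil => intro acc _ _ _; rfl
  | cons x xs ih =>
    intro acc hxs hacc hfg
    have hxS : x ∈ S := hxs x (by simp)
    have hstep : PySem.List.insertBy f x acc = PySem.List.insertBy g x acc :=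
      pv_insertBy_congr f g x acc (fun y hy => hfg x hxS y (hacc y hy))
    have hacc' : ∀ y ∈ PySem.List.insertBy g x acc, y ∈ S := by
      intro y hy
      rcases (PySem.List.mem_insertBy g x y acc).1 hy with rfl | hy
      · exact hxS
      · exact hacc y hy
    simp only [List.foldl_cons, hstep]
    exact ih (PySem.List.insertBy g x acc) (fun y hy => hxs y (by simp [hy])) hacc' hfg

-- A's partition loop, characterised as two filters of the stripped list.
theorem pv_A_loop (ys : List String) (acc : List String × List String) :
    ys.foldl (fun (acc : List String × List String) y =>
        let s := PySem.Str.strip y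
        if PySem.Str.strIsdigit s then (acc.1 ++ [s], acc.2)
        else if s != "" && s != "-" then (acc.1, acc.2 ++ [s])
        else acc) acc
      = (acc.1 ++ (ys.map (fun y => PySem.Str.strip y)).filter (fun s => PySem.Str.strIsdigit s),
         acc.2 ++ (ys.map (fun y => PySem.Str.strip y)).filter
           (fun s => !PySem.Str.strIsdigit s && (s != "" && s != "-"))) := by
  induction ys generalizing acc with
  | nil => simp
  | cons y ys ih =>
    rw [List.foldl_cons, ih]
    by_cases hd : PySem.Chars.strIsdigit (PySem.Chars.strip y.toList) = true
    · simp [hd]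
    · simp only [Bool.not_eq_true] at hd
      by_cases h1 : PySem.Str.strip y = ""
      · simp [h1, show PySem.Chars.strIsdigit [] = false by decide]
      · by_cases h2 : PySem.Str.strip y = "-"
        · simp [h2, show PySem.Chars.strIsdigit ['-'] = false by decide]
        · simp [hd, h1, h2]

theorem sortedYears_py_eq (years : List String) :
    sortedYears_py years = sortedYears_py_alt years := by
  unfold sortedYears_py sortedYears_py_alt
  rw [pv_A_loop]
  simp only [List.nil_append]
  set st : List String := years.map (fun y => PySem.Str.strip y) with hst
  -- B's kept list filtered to each group is exactly A's corresponding partition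
  have hnum : List.filter (fun s => PySem.Str.strIsdigit s)
      (List.filter (fun s => PySem.Str.strIsdigit s || (s != "" && s != "-")) st)
      = List.filter (fun s => PySem.Str.strIsdigit s) st := by
    rw [List.filter_filter]
    refine List.filter_congr (fun s _ => ?_)
    cases h : PySem.Chars.strIsdigit s.toList <;> simp [h]
  have hoth : List.filter (fun x => !PySem.Str.strIsdigit x)
      (List.filter (fun s => PySem.Str.strIsdigit s || (s != "" && s != "-")) st)
      = List.filter (fun s => !PySem.Str.strIsdigit s && (s != "" && s != "-")) st := by
    rw [List.filter_filter]
    refine List.filter_congr (fun s _ => ?_)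
    cases h : PySem.Chars.strIsdigit s.toList <;> simp [h]
  -- digit entries dominate non-digit entries under B's composite key
  have hPf : ∀ a b : String, PySem.Str.strIsdigit a = true → PySem.Str.strIsdigit b = false →
      (decide (pvKey1 b < pvKey1 a) || (!decide (pvKey1 a < pvKey1 b) && decide (pvKey2 b < pvKey2 a))) = true ∧
      (decide (pvKey1 a < pvKey1 b) || (!decide (pvKey1 b < pvKey1 a) && decide (pvKey2 a < pvKey2 b))) = false := by
    intro a b ha hb
    have haC : PySem.Chars.strIsdigit a.toList = true := by simpa using ha
    have hbC : PySem.Chars.strIsdigit b.toList = false := by simpa using hb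
    constructor
    · norm_num [pvKey1, haC, hbC]
    · norm_num [pvKey1, haC, hbC]
  have hsplit := pv_foldl_ins_split (fun s => PySem.Str.strIsdigit s)
      (fun a b => decide (pvKey1 b < pvKey1 a) || (!decide (pvKey1 a < pvKey1 b) && decide (pvKey2 b < pvKey2 a))) hPf
      (List.filter (fun s => PySem.Str.strIsdigit s || (s != "" && s != "-")) st) [] []
      (by simp) (by simp)
  simp only [List.nil_append] at hsplit
  rw [show ∀ xs : List String, PySem.List.sorted2 xs pvKey1 pvKey2 true
        = xs.foldl (fun acc x => PySem.List.insertBy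
            (fun a b => decide (pvKey1 b < pvKey1 a)
              || (!decide (pvKey1 a < pvKey1 b) && decide (pvKey2 b < pvKey2 a))) x acc) []
      from fun _ => rfl,
    hsplit, hnum, hoth,
    PySem.List.sorted_rev_eq_foldl_insertBy (List.filter (fun s => PySem.Str.strIsdigit s) st)
      (fun y => (PySem.Int.ofStr? y).getD 0),
    PySem.List.sorted_rev_eq_foldl_insertBy
      (List.filter (fun s => !PySem.Str.strIsdigit s && (s != "" && s != "-")) st)
      (fun y => y)]
  -- on the digit group the composite key compares like the int key
  have h1 : (List.filter (fun s => PySem.Str.strIsdigit s) st).foldl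
        (fun acc x => PySem.List.insertBy (fun a b => decide (pvKey1 b < pvKey1 a) || (!decide (pvKey1 a < pvKey1 b) && decide (pvKey2 b < pvKey2 a))) x acc) []
      = (List.filter (fun s => PySem.Str.strIsdigit s) st).foldl
        (fun acc x => PySem.List.insertBy
          (fun a b => decide ((PySem.Int.ofStr? b).getD 0 < (PySem.Int.ofStr? a).getD 0)) x acc) [] := by
    refine pv_foldl_ins_congr _ _ (List.filter (fun s => PySem.Str.strIsdigit s) st) _ []
      (fun x hx => hx) (by simp) ?_
    intro a ha b hb
    have haC : PySem.Chars.strIsdigit a.toList = true := by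
      simpa using (List.mem_filter.1 ha).2
    have hbC : PySem.Chars.strIsdigit b.toList = true := by
      simpa using (List.mem_filter.1 hb).2
    simp [pvKey1, pvKey2, haC, hbC, Prod.Lex.lt_iff]
  -- on the other group the composite key compares like the plain string key
  have h2 : (List.filter (fun s => !PySem.Str.strIsdigit s && (s != "" && s != "-")) st).foldl
        (fun acc x => PySem.List.insertBy (fun a b => decide (pvKey1 b < pvKey1 a) || (!decide (pvKey1 a < pvKey1 b) && decide (pvKey2 b < pvKey2 a))) x acc) []
      = (List.filter (fun s => !PySem.Str.strIsdigit s && (s != "" && s != "-")) st).foldl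
        (fun acc x => PySem.List.insertBy (fun a b => decide (b < a)) x acc) [] := by
    refine pv_foldl_ins_congr _ _
      (List.filter (fun s => !PySem.Str.strIsdigit s && (s != "" && s != "-")) st) _ []
      (fun x hx => hx) (by simp) ?_
    intro a ha b hb
    have haC : PySem.Chars.strIsdigit a.toList = false := by
      have := (List.mem_filter.1 ha).2
      cases h : PySem.Chars.strIsdigit a.toList <;> simp [h] at this ⊢
    have hbC : PySem.Chars.strIsdigit b.toList = false := by
      have := (List.mem_filter.1 hb).2
      cases h : PySem.Chars.strIsdigit b.toList <;> simp [h] at this ⊢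
    simp [pvKey1, pvKey2, haC, hbC, Prod.Lex.lt_iff]
  rw [h1, h2]

-- ===== VERDICT (by name: the statement is the Claim_ definition above) =====
theorem sortedYears_py_spec : Claim_equal_sortedYears_py := by
  intro years _
  exact sortedYears_py_eq years
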